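-- pv_equiv track=rewrite | github.com/Alvin-Furman-CS-Classroom/project-2-ai-system-ronan-and-kelvin-s-epic-marketplace | scripts/build_working_set_200k.py | _categories_pass
-- ===== SOURCE A (Python) =====
-- CATEGORY_BLACKLIST_TERMS = [
--     "laptop accessories",
--     "tablet accessories",
--     "tablet replacement parts",
--     "skins & decals",
--     "decals",
--     "sleeves",
--     "laptop bags",
--     "bags & cases",
--     "camera bags",
--     "cable organizer",
--     "cord management",
--     "ac adapters",
--     "power converters",
--     "power strips",
--     "surge protectors",
--     "telephone accessories",
--     "mp3 & mp4 player accessories",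
--     "gps system accessories",
--     "vehicle electronics accessories",
--     "arm & wristband accessories",
--     "clips, arm & wristbands",
--     "earpads",
--     "headphone adapters",
--     "headphone extension",
--     "extension cords",
--     "cases",  # headphone cases, eBook covers, etc.
--     "covers",
--     "screen protectors",
--     "mounts",
--     "stands",
--     "office electronics accessories",
--     "cleaning & repair",
--     "cables & accessories",
--     "computer cable adapters",
--     "audio & video accessories",
--     "memory card accessories",
--     "hard drive accessories",
--     "monitor accessories",
--     "cable security",
--     "blank media",
--     "usb gadgets",
--     "media storage",
--     "racks & cabinets",
--     "home audio accessories",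
--     "warranties",
--     "service plans",
--     "tripods & monopods",
--     "straps",
--     "battery holders",
--     "replacement parts",
--     "remote controls",
-- ]
--
-- CATEGORY_ELEMENT_WHITELIST = frozenset({
--     "computer accessories & peripherals",
--     "headphones, earbuds & accessories",
--     "keyboards, mice & accessories",
-- })
--
-- def _categories_pass(cats: list[str]) -> bool:
--     """Return True if the category path looks like a real device, not an accessory."""
--     for element in cats:
--         el = element.lower()
--         if el in CATEGORY_ELEMENT_WHITELIST:
--             continue
--         for term in CATEGORY_BLACKLIST_TERMS:
--             if term in el:
--                 return False
--         if el == "accessories":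
--             return False
--     return True
-- ===== SOURCE B (Python) =====
-- CATEGORY_BLACKLIST_TERMS = [
--     "laptop accessories",
--     "tablet accessories",
--     "tablet replacement parts",
--     "skins & decals",
--     "decals",
--     "sleeves",
--     "laptop bags",
--     "bags & cases",
--     "camera bags",
--     "cable organizer",
--     "cord management",
--     "ac adapters",
--     "power converters",
--     "power strips",
--     "surge protectors",
--     "telephone accessories",
--     "mp3 & mp4 player accessories",
--     "gps system accessories",
--     "vehicle electronics accessories",
--     "arm & wristband accessories",
--     "clips, arm & wristbands",
--     "earpads",
--     "headphone adapters",
--     "headphone extension",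
--     "extension cords",
--     "cases",
--     "covers",
--     "screen protectors",
--     "mounts",
--     "stands",
--     "office electronics accessories",
--     "cleaning & repair",
--     "cables & accessories",
--     "computer cable adapters",
--     "audio & video accessories",
--     "memory card accessories",
--     "hard drive accessories",
--     "monitor accessories",
--     "cable security",
--     "blank media",
--     "usb gadgets",
--     "media storage",
--     "racks & cabinets",
--     "home audio accessories",
--     "warranties",
--     "service plans",
--     "tripods & monopods",
--     "straps",
--     "battery holders",
--     "replacement parts",
--     "remote controls",
-- ]
--
-- CATEGORY_ELEMENT_WHITELIST = frozenset({
--     "computer accessories & peripherals",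
--     "headphones, earbuds & accessories",
--     "keyboards, mice & accessories",
-- })
--
-- # First-character index of the blacklist: bucket the terms by their first
-- # character, then scan each element position-major — at each position do one
-- # dict lookup and only test the few terms that could start there.
-- _FIRST: dict = {}
-- for _t in CATEGORY_BLACKLIST_TERMS:
--     _FIRST.setdefault(_t[0], []).append(_t)
--
-- def _hits_blacklist(el: str) -> bool:
--     """True iff some blacklist term occurs in el (position-major indexed scan)."""
--     for i in range(len(el)):
--         bucket = _FIRST.get(el[i])
--         if bucket and any(el.startswith(t, i) for t in bucket):
--             return True
--     return False
--
-- def _blocked(el: str) -> bool: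
--     if el in CATEGORY_ELEMENT_WHITELIST:
--         return False
--     return _hits_blacklist(el) or el == "accessories"
--
-- def _categories_pass(cats: list[str]) -> bool:
--     return not any(_blocked(element.lower()) for element in cats)
-- ===== Notes on version B (the rewrite author's own statement) =====
-- stated objective: alternative
-- what changed: Replaced A's term-major inner loop (51 separate substring scans per element) by a first-character bucket index of the blacklist built once in a dict, with a position-major scan of each element doing one dict lookup per position and startswith tests only on the few matching-initial terms, under a single 'not any(blocked)' pass.
import Mathlib
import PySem

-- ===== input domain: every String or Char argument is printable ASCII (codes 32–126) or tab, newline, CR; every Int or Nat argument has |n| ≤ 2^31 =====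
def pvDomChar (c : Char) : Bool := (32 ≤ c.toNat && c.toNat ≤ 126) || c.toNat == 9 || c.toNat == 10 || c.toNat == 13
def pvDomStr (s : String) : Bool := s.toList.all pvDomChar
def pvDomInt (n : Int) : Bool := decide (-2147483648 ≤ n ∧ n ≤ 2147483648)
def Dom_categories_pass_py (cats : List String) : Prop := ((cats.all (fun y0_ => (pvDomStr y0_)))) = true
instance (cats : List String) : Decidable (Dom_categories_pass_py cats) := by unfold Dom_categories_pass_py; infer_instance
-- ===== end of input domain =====

-- B replaces A's term-major inner loop (51 substring scans per element) by a
-- position-major scan over the element through a first-character bucket index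
-- of the blacklist, under a single `not any(blocked)` pass — objective: alternative.

-- shared module-level constants of both Pythons
def pvTerms : List String := [
  "laptop accessories", "tablet accessories", "tablet replacement parts",
  "skins & decals", "decals", "sleeves", "laptop bags", "bags & cases",
  "camera bags", "cable organizer", "cord management", "ac adapters",
  "power converters", "power strips", "surge protectors",
  "telephone accessories", "mp3 & mp4 player accessories",
  "gps system accessories", "vehicle electronics accessories",
  "arm & wristband accessories", "clips, arm & wristbands", "earpads",
  "headphone adapters", "headphone extension", "extension cords", "cases",
  "covers", "screen protectors", "mounts", "stands",
  "office electronics accessories", "cleaning & repair",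
  "cables & accessories", "computer cable adapters",
  "audio & video accessories", "memory card accessories",
  "hard drive accessories", "monitor accessories", "cable security",
  "blank media", "usb gadgets", "media storage", "racks & cabinets",
  "home audio accessories", "warranties", "service plans",
  "tripods & monopods", "straps", "battery holders", "replacement parts",
  "remote controls"]

def pvWhitelist : PySem.Set String := PySem.Set.ofList [
  "computer accessories & peripherals",
  "headphones, earbuds & accessories",
  "keyboards, mice & accessories"]

-- ===== PORT A =====
-- A's inner 'for term in CATEGORY_BLACKLIST_TERMS: if term in el: return False'
-- (true = some term hit, i.e. A returns False)
def pvBlackLoopA (el : String) : List String → Bool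
  | [] => false
  | t :: ts => if PySem.Str.isIn t el then true else pvBlackLoopA el ts

def categories_pass_py (cats : List String) : Bool :=
  match cats with
  | [] => true
  | element :: rest =>
    let el := PySem.Str.lower element
    if PySem.Set.contains pvWhitelist el then categories_pass_py rest
    else if pvBlackLoopA el pvTerms then false
    else if el == "accessories" then false
    else categories_pass_py rest

-- ===== PORT B =====
-- _FIRST: the blacklist terms bucketed by first character (dict built by a
-- setdefault/append loop; t[0] ported as headD — every term is nonempty).
def pvFirst : PySem.Dict Char (List String) :=
  pvTerms.foldl
    (fun d t => d.modify (t.toList.headD ' ') [] (fun b => b ++ [t]))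
    PySem.Dict.empty

-- _hits_blacklist: the index loop 'for i in range(len(el))' with
-- 'el.startswith(t, i)' is ported as structural recursion over the suffixes
-- cs.drop i of the character list (same positions, same tests, same order).
def pvScan : List Char → Bool
  | [] => false
  | c :: rest =>
    ((pvFirst.getD c []).any (fun t => PySem.Chars.startswith (c :: rest) t.toList))
      || pvScan rest

def pvBlocked (el : String) : Bool :=
  if PySem.Set.contains pvWhitelist el then false
  else pvScan el.toList || el == "accessories"

def categories_pass_py_alt (cats : List String) : Bool :=
  !(cats.any (fun element => pvBlocked (PySem.Str.lower element)))

-- ===== PRECONDITION & SPEC =====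
def Spec_categories_pass_py (cats : List String) (out : Bool) : Prop := out = categories_pass_py_alt cats
instance (cats : List String) (out : Bool) : Decidable (Spec_categories_pass_py cats out) := by unfold Spec_categories_pass_py; infer_instance

-- ===== CLAIM =====
def Claim_equal_categories_pass_py : Prop := ∀ (cats : List String), Dom_categories_pass_py cats → Spec_categories_pass_py cats (categories_pass_py cats)

-- ===== LEMMAS AND PROOFS =====
theorem pvBuild (L : List String) (d : PySem.Dict Char (List String)) (c : Char) :
    (L.foldl (fun d t => d.modify (t.toList.headD ' ') [] (fun b => b ++ [t])) d).getD c []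
      = d.getD c [] ++ (L.filter (fun t => t.toList.headD ' ' == c)) := by
  induction L generalizing d with
  | nil => simp
  | cons t L ih =>
    rw [List.foldl_cons, ih, PySem.Dict.getD_modify, List.filter_cons]
    by_cases h : c = t.toList.headD ' '
    · simp [h]
    · rw [if_neg h, if_neg (fun hh => h ((beq_iff_eq.mp hh).symm))]

theorem pvFirst_spec (c : Char) :
    pvFirst.getD c [] = pvTerms.filter (fun t => t.toList.headD ' ' == c) := by
  rw [pvFirst, pvBuild]
  simp [PySem.Dict.getD_empty]

theorem pvTerms_nonempty : ∀ t ∈ pvTerms, t.toList ≠ [] := by decide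

theorem pvScan_iff (cs : List Char) :
    pvScan cs = true ↔ ∃ t ∈ pvTerms, t.toList <:+: cs := by
  induction cs with
  | nil =>
    simp only [pvScan]
    constructor
    · intro h; exact absurd h (by simp)
    · rintro ⟨t, ht, hinf⟩
      exact absurd (List.eq_nil_of_infix_nil hinf) (pvTerms_nonempty t ht)
  | cons c rest ih =>
    simp only [pvScan, Bool.or_eq_true, List.any_eq_true, pvFirst_spec,
      List.mem_filter, ih, PySem.Chars.startswith_iff]
    constructor
    · rintro (⟨t, ⟨ht, _⟩, hp⟩ | ⟨t, ht, hi⟩)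
      · exact ⟨t, ht, hp.isInfix⟩
      · exact ⟨t, ht, hi.trans (List.suffix_cons c rest).isInfix⟩
    · rintro ⟨t, ht, hi⟩
      rcases List.infix_cons_iff.mp hi with hp | hi'
      · left
        refine ⟨t, ⟨ht, ?_⟩, hp⟩
        obtain ⟨l, hl⟩ := hp
        cases hhead : t.toList with
        | nil => exact absurd hhead (pvTerms_nonempty t ht)
        | cons a as =>
          rw [hhead] at hl
          simp only [List.cons_append, List.cons.injEq] at hl
          simp [hl.1]
      · exact Or.inr ⟨t, ht, hi'⟩

theorem pvBlackLoopA_iff (el : String) (ts : List String) :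
    pvBlackLoopA el ts = true ↔ ∃ t ∈ ts, t.toList <:+: el.toList := by
  induction ts with
  | nil => simp [pvBlackLoopA]
  | cons t ts ih =>
    simp only [pvBlackLoopA, List.mem_cons]
    split_ifs with h
    · simp only [true_iff]
      exact ⟨t, Or.inl rfl, (PySem.Str.isIn_iff_infix t el).mp h⟩
    · rw [ih]
      constructor
      · rintro ⟨u, hu, hi⟩; exact ⟨u, Or.inr hu, hi⟩
      · rintro ⟨u, hu | hu, hi⟩
        · exact absurd ((PySem.Str.isIn_iff_infix t el).mpr (hu ▸ hi)) (by simp_all)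
        · exact ⟨u, hu, hi⟩

theorem categories_pass_eq (cats : List String) :
    categories_pass_py cats = categories_pass_py_alt cats := by
  induction cats with
  | nil => rfl
  | cons e rest ih =>
    rw [categories_pass_py]
    simp only [categories_pass_py_alt, List.any_cons, pvBlocked] at *
    have hbl : pvBlackLoopA (PySem.Str.lower e) pvTerms
        = pvScan (PySem.Str.lower e).toList := by
      rcases hb : pvBlackLoopA (PySem.Str.lower e) pvTerms with _ | _
      · rcases hs : pvScan (PySem.Str.lower e).toList with _ | _
        · rfl
        · exact absurd ((pvBlackLoopA_iff _ _).mpr ((pvScan_iff _).mp hs)) (by simp [hb])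
      · exact ((pvScan_iff _).mpr ((pvBlackLoopA_iff _ _).mp hb)).symm
    split_ifs <;> simp_all

-- ===== VERDICT =====
theorem categories_pass_py_spec : Claim_equal_categories_pass_py := by
  intro cats _
  exact (categories_pass_eq cats).symm ▸ rfl
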